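-- pv_equiv track=rewrite | github.com/jeffs/advent | 2018/6/part1.py | closest_coordinate
-- ===== SOURCE A (Python) =====
-- from functools import partial
--
-- def closest_coordinate(point, coordinates):
--     min_dist = min(map(partial(distance, point), coordinates))
--     closest = None
--     for coord in coordinates:
--         if distance(point, coord) == min_dist:
--             if closest:
--                 return None
--             closest = coord
--     return closest
--
-- def distance(point0, point1):
--     x0, y0 = point0
--     x1, y1 = point1
--     return abs(x1 - x0) + abs(y1 - y0)
-- ===== SOURCE B (Python) =====
-- def closest_coordinate(point, coordinates):
--     best = None
--     best_dist = None
--     tie = False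
--     for coord in coordinates:
--         d = abs(coord[0] - point[0]) + abs(coord[1] - point[1])
--         if best_dist is None or d < best_dist:
--             best, best_dist, tie = coord, d, False
--         elif d == best_dist:
--             tie = True
--     return None if tie else best
-- ===== Notes on version B (the rewrite author's own statement) =====
-- stated objective: faster
-- what changed: A computes min(distances) in one pass and then rescans the list for minimal coordinates; B is a single pass keeping the running best coordinate, best distance and a tie flag; Pre_ excludes only the empty list, on which A's min() raises ValueError.
import Mathlib
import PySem

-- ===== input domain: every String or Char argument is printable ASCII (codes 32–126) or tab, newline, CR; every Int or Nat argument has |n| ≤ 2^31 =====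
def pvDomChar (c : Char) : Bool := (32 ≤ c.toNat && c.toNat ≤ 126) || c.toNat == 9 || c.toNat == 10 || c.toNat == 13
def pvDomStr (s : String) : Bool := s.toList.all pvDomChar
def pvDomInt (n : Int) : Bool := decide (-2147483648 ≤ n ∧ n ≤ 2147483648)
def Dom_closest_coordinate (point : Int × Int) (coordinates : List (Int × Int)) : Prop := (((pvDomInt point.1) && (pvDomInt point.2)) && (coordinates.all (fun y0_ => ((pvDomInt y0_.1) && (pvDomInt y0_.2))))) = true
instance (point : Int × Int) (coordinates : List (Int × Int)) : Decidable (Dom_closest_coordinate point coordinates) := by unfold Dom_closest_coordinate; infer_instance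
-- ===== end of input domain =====

-- B replaces A's two passes (min of distances, then a rescan for minimal coordinates) by one
-- pass keeping the running best coordinate, best distance and a tie flag.


-- ===== PORT A =====
-- helper `distance` of the module
def pv_distance (point0 point1 : Int × Int) : Int :=
  |point1.1 - point0.1| + |point1.2 - point0.2|

-- the `for coord in coordinates` loop with its early `return None`
def pvLoopA (point : Int × Int) (min_dist : Int) :
    List (Int × Int) → Option (Int × Int) → Option (Int × Int)
  | [], closest => closest
  | coord :: rest, closest =>
    if pv_distance point coord = min_dist then
      match closest with
      | some _ => none
      | none => pvLoopA point min_dist rest (some coord)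
    else pvLoopA point min_dist rest closest

def closest_coordinate (point : Int × Int) (coordinates : List (Int × Int)) : Option (Int × Int) :=
  match PySem.List.min? (coordinates.map (fun c => pv_distance point c)) (fun y => y) with
  | none => none   -- Python's min raises ValueError here; excluded by Pre_
  | some min_dist => pvLoopA point min_dist coordinates none

-- ===== PORT B =====
-- B's loop body: state (best, best_dist, tie)
def pvStepB (point : Int × Int) (st : Option (Int × Int) × Option Int × Bool)
    (coord : Int × Int) : Option (Int × Int) × Option Int × Bool :=
  let d := |coord.1 - point.1| + |coord.2 - point.2|
  match st with
  | (_, none, _) => (some coord, some d, false)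
  | (best, some bd, tie) =>
    if d < bd then (some coord, some d, false)
    else if d = bd then (best, some bd, true)
    else (best, some bd, tie)

def closest_coordinate_alt (point : Int × Int) (coordinates : List (Int × Int)) : Option (Int × Int) :=
  match coordinates.foldl (pvStepB point) (none, none, false) with
  | (best, _, tie) => if tie then none else best

-- ===== PRECONDITION & SPEC =====
-- Pre_ excludes only the empty list, on which A's min() raises ValueError.
def Pre_closest_coordinate (point : Int × Int) (coordinates : List (Int × Int)) : Prop :=
  coordinates ≠ []
instance (point : Int × Int) (coordinates : List (Int × Int)) : Decidable (Pre_closest_coordinate point coordinates) := by unfold Pre_closest_coordinate; infer_instance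

def pvWitness_closest_coordinate : (Int × Int) × (List (Int × Int)) := ((0, 0), [(1, 2), (3, 0)])

def Spec_closest_coordinate (point : Int × Int) (coordinates : List (Int × Int)) (out : Option (Int × Int)) : Prop := out = closest_coordinate_alt point coordinates
instance (point : Int × Int) (coordinates : List (Int × Int)) (out : Option (Int × Int)) : Decidable (Spec_closest_coordinate point coordinates out) := by unfold Spec_closest_coordinate; infer_instance

-- ===== CLAIM (what is proved, stated in full; the proofs are below) =====
def Claim_equal_closest_coordinate : Prop := ∀ (point : Int × Int) (coordinates : List (Int × Int)), Dom_closest_coordinate point coordinates → Pre_closest_coordinate point coordinates → Spec_closest_coordinate point coordinates (closest_coordinate point coordinates)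

-- ===== LEMMAS AND PROOFS =====

-- distance of x to the point, as both ports compute it
def pvD (point x : Int × Int) : Int := |x.1 - point.1| + |x.2 - point.2|

-- minimum distance over c :: t
def pvM (point : Int × Int) (c : Int × Int) (t : List (Int × Int)) : Int :=
  t.foldl (fun a x => min a (pvD point x)) (pvD point c)

-- the coordinates of c :: t achieving the minimum distance
def pvAch (point : Int × Int) (c : Int × Int) (t : List (Int × Int)) : List (Int × Int) :=
  (c :: t).filter (fun x => pvD point x = pvM point c t)

-- the state B's fold reaches after consuming the nonempty prefix c :: t
def pvSpecState (point : Int × Int) (c : Int × Int) (t : List (Int × Int)) :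
    Option (Int × Int) × Option Int × Bool :=
  ((pvAch point c t).head?, some (pvM point c t), decide (2 ≤ (pvAch point c t).length))

theorem pvM_append (point c : Int × Int) (t : List (Int × Int)) (x : Int × Int) :
    pvM point c (t ++ [x]) = min (pvM point c t) (pvD point x) := by
  simp [pvM]

theorem pvM_le (point c : Int × Int) (t : List (Int × Int)) :
    ∀ y ∈ c :: t, pvM point c t ≤ pvD point y := by
  have h : pvM point c t = (t.map (pvD point)).foldl min (pvD point c) := by
    simp [pvM, List.foldl_map]
  intro y hy
  rcases List.mem_cons.1 hy with hc | ht
  · subst hc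
    rw [h]; exact (PySem.List.foldl_min_le (t.map (pvD point)) (pvD point y)).1
  · rw [h]
    exact (PySem.List.foldl_min_le (t.map (pvD point)) (pvD point c)).2 _
      (List.mem_map_of_mem ht)

theorem pvStep_spec (point c : Int × Int) (t : List (Int × Int)) (x : Int × Int) :
    pvStepB point (pvSpecState point c t) x = pvSpecState point c (t ++ [x]) := by
  have hle := pvM_le point c t
  have hstep : pvStepB point (pvSpecState point c t) x
      = (if pvD point x < pvM point c t then ((some x), some (pvD point x), false)
         else if pvD point x = pvM point c t then ((pvAch point c t).head?, some (pvM point c t), true)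
         else pvSpecState point c t) := rfl
  rw [hstep]
  by_cases hlt : pvD point x < pvM point c t
  · -- strict improvement: x becomes the unique achiever
    have hmin : pvM point c (t ++ [x]) = pvD point x := by
      rw [pvM_append]; omega
    have hnil : (c :: t).filter (fun y => pvD point y = pvD point x) = [] := by
      apply List.filter_eq_nil_iff.2
      intro y hy
      have := hle y hy
      simp only [decide_eq_true_eq]
      omega
    have hach : pvAch point c (t ++ [x]) = [x] := by
      unfold pvAch
      rw [hmin, show c :: (t ++ [x]) = (c :: t) ++ [x] by simp, List.filter_append, hnil]
      simp
    simp [pvSpecState, hach, hmin, hlt]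
  · have hmin : pvM point c (t ++ [x]) = pvM point c t := by
      rw [pvM_append]; omega
    have hach : pvAch point c (t ++ [x])
        = pvAch point c t ++ if pvD point x = pvM point c t then [x] else [] := by
      unfold pvAch
      rw [hmin, show c :: (t ++ [x]) = (c :: t) ++ [x] by simp, List.filter_append]
      by_cases h : pvD point x = pvM point c t <;> simp [h]
    have hmem : pvM point c t = pvD point c ∨ pvM point c t ∈ t.map (pvD point) := by
      have h1 : pvM point c t = (t.map (pvD point)).foldl min (pvD point c) := by
        simp [pvM, List.foldl_map]
      rw [h1]
      exact PySem.List.foldl_min_mem (t.map (pvD point)) (pvD point c)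
    have hne : pvAch point c t ≠ [] := by
      rcases hmem with hm | hm
      · exact List.ne_nil_of_mem (List.mem_filter.2 ⟨List.mem_cons_self, by simp [hm]⟩)
      · rcases List.mem_map.1 hm with ⟨z, hz, hzd⟩
        exact List.ne_nil_of_mem
          (List.mem_filter.2 ⟨List.mem_cons_of_mem _ hz, by simp [hzd]⟩)
    obtain ⟨a, as, ha⟩ := List.exists_cons_of_ne_nil hne
    by_cases heq : pvD point x = pvM point c t
    · have hlen : 2 ≤ (pvAch point c (t ++ [x])).length := by
        rw [hach, ha]; simp [heq]
      simp [pvSpecState, hach, hmin, heq, ha]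
    · simp [pvSpecState, hach, hmin, hlt, heq]

theorem pvFoldB_spec (point c : Int × Int) :
    ∀ (xs t : List (Int × Int)),
      xs.foldl (pvStepB point) (pvSpecState point c t) = pvSpecState point c (t ++ xs) := by
  intro xs
  induction xs with
  | nil => intro t; simp
  | cons x xs ih =>
    intro t
    rw [List.foldl_cons, pvStep_spec, ih]
    simp

theorem pvSpecState_singleton (point c : Int × Int) :
    pvStepB point (none, none, false) c = pvSpecState point c [] := by
  simp [pvStepB, pvSpecState, pvAch, pvM, pvD]

-- closed form of A's scan loop
theorem pvLoopA_spec (point : Int × Int) (m : Int) :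
    ∀ (ys : List (Int × Int)),
      (∀ cc : Int × Int, pvLoopA point m ys (some cc)
        = if ys.any (fun x => pvD point x = m) then none else some cc)
      ∧ pvLoopA point m ys none
        = (if 2 ≤ (ys.filter (fun x => pvD point x = m)).length then none
           else (ys.filter (fun x => pvD point x = m)).head?) := by
  intro ys
  induction ys with
  | nil => simp [pvLoopA]
  | cons y t ih =>
    have hdy : pv_distance point y = pvD point y := rfl
    constructor
    · intro cc
      by_cases h : pvD point y = m
      · simp [pvLoopA, hdy, h]
      · have hl : pvLoopA point m (y :: t) (some cc) = pvLoopA point m t (some cc) := by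
          simp [pvLoopA, hdy, h]
        have hd : decide (pvD point y = m) = false := by simp [h]
        rw [hl, ih.1 cc, List.any_cons, hd, Bool.false_or]
    · by_cases h : pvD point y = m
      · have hl : pvLoopA point m (y :: t) none = pvLoopA point m t (some y) := by
          simp [pvLoopA, hdy, h]
        have hf : (y :: t).filter (fun x => decide (pvD point x = m))
            = y :: t.filter (fun x => decide (pvD point x = m)) := by simp [h]
        rw [hl, ih.1 y, hf]
        by_cases h2 : (t.any fun x => decide (pvD point x = m)) = true
        · have hlen : 1 ≤ (t.filter (fun x => decide (pvD point x = m))).length := by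
            rcases List.any_eq_true.1 h2 with ⟨z, hz, hzm⟩
            exact List.length_pos_of_mem (List.mem_filter.2 ⟨hz, hzm⟩)
          have hc : 2 ≤ (y :: t.filter (fun x => decide (pvD point x = m))).length := by
            simp; omega
          rw [if_pos h2, if_pos hc]
        · have h2' : (t.any fun x => decide (pvD point x = m)) = false :=
            Bool.eq_false_iff.2 h2
          have hf0 : t.filter (fun x => decide (pvD point x = m)) = [] := by
            apply List.filter_eq_nil_iff.2
            intro z hz
            simpa using List.any_eq_false.1 h2' z hz
          rw [if_neg h2, hf0]
          simp
      · have hl : pvLoopA point m (y :: t) none = pvLoopA point m t none := by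
          simp [pvLoopA, hdy, h]
        rw [hl, ih.2]
        simp [h]

theorem pvA_closed (point c : Int × Int) (t : List (Int × Int)) :
    closest_coordinate point (c :: t)
      = (if 2 ≤ (pvAch point c t).length then none else (pvAch point c t).head?) := by
  have hmin : PySem.List.min? ((c :: t).map (fun x => pv_distance point x)) (fun y => y)
      = some (pvM point c t) := by
    rw [List.map_cons, PySem.List.min?_id_cons]
    simp [pvM, List.foldl_map]
    rfl
  unfold closest_coordinate
  rw [hmin]
  exact (pvLoopA_spec point (pvM point c t) (c :: t)).2

theorem pvB_closed (point c : Int × Int) (t : List (Int × Int)) :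
    closest_coordinate_alt point (c :: t)
      = (if 2 ≤ (pvAch point c t).length then none else (pvAch point c t).head?) := by
  unfold closest_coordinate_alt
  rw [List.foldl_cons, pvSpecState_singleton, pvFoldB_spec point c t [], List.nil_append]
  simp only [pvSpecState]
  by_cases h : 2 ≤ (pvAch point c t).length <;> simp [h]

-- ===== VERDICT (by name: the statement is the Claim_ definition above) =====
theorem closest_coordinate_spec : Claim_equal_closest_coordinate := by
  intro point coordinates _ hpre
  obtain ⟨c, t, rfl⟩ := List.exists_cons_of_ne_nil hpre
  unfold Spec_closest_coordinate
  rw [pvA_closed, pvB_closed]
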